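-- pv_equiv track=rewrite | github.com/KaliBlip/Kids-Edupy | english_assistant_mvp.py | get_error_type
-- ===== SOURCE A (Python) =====
-- def get_error_type(pattern: str) -> str:
--     """Categorize error types based on pattern"""
--     if any(keyword in pattern.lower() for keyword in ['are', 'is', 'have', 'has']):
--         return 'Subject-Verb Agreement'
--     elif any(keyword in pattern.lower() for keyword in ['\\ba\\s', '\\ban\\s']):
--         return 'Article Usage'
--     elif any(keyword in pattern.lower() for keyword in ['your', 'its', 'there', 'to']):
--         return 'Word Confusion'
--     elif any(keyword in pattern.lower() for keyword in ['dont', 'cant', 'wont']):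
--         return 'Contractions'
--     elif 'than' in pattern.lower() or 'better' in pattern.lower():
--         return 'Comparatives'
--     elif any(keyword in pattern.lower() for keyword in ['of', 'have']):
--         return 'Modal Verbs'
--     else:
--         return 'Grammar'
-- ===== SOURCE B (Python) =====
-- _LABELS = ['Subject-Verb Agreement', 'Article Usage', 'Word Confusion',
--            'Contractions', 'Comparatives', 'Modal Verbs', 'Grammar']
--
-- # Each keyword mapped to the index of its category; 'have' belongs to both the
-- # Subject-Verb and Modal-Verbs groups, so it keeps the smaller index 0.
-- _PRIORITY = {'are': 0, 'is': 0, 'have': 0, 'has': 0,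
--              '\\ba\\s': 1, '\\ban\\s': 1,
--              'your': 2, 'its': 2, 'there': 2, 'to': 2,
--              'dont': 3, 'cant': 3, 'wont': 3,
--              'than': 4, 'better': 4,
--              'of': 5}
--
-- def get_error_type(pattern: str) -> str:
--     """Categorize error types based on pattern"""
--     low = pattern.lower()
--     best = min((p for kw, p in _PRIORITY.items() if kw in low), default=6)
--     return _LABELS[best]
-- ===== Notes on version B (the rewrite author's own statement) =====
-- stated objective: simpler
-- what changed: Replaces the ordered if/elif chain of group membership tests by an arithmetic formulation: a flat keyword-to-category-index map, the minimum index over the keywords occurring in the once-lowered pattern, and a single label-table lookup (control flow and branch order disappear; 'have', which A lists in two groups, keeps its smaller index).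
import Mathlib
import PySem

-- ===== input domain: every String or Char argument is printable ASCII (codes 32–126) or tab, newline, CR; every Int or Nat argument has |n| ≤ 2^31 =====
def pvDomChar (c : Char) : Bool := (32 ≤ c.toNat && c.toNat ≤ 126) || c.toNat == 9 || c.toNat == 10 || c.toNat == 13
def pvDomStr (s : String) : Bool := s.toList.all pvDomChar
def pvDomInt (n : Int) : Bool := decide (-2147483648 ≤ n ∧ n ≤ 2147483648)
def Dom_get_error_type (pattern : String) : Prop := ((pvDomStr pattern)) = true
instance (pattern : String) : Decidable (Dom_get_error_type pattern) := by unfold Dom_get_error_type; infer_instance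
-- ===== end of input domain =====

-- B replaces A's ordered if/elif chain by an arithmetic formulation: a keyword→category-index
-- map, min of the indices of the keywords occurring in the lowered pattern, one label lookup
-- (objective: simpler).

-- ===== PORT A =====
def get_error_type (pattern : String) : String :=
  if ["are", "is", "have", "has"].any (fun k => PySem.Str.isIn k (PySem.Str.lower pattern)) then
    "Subject-Verb Agreement"
  else if ["\\ba\\s", "\\ban\\s"].any (fun k => PySem.Str.isIn k (PySem.Str.lower pattern)) then
    "Article Usage"
  else if ["your", "its", "there", "to"].any (fun k => PySem.Str.isIn k (PySem.Str.lower pattern)) then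
    "Word Confusion"
  else if ["dont", "cant", "wont"].any (fun k => PySem.Str.isIn k (PySem.Str.lower pattern)) then
    "Contractions"
  else if PySem.Str.isIn "than" (PySem.Str.lower pattern) || PySem.Str.isIn "better" (PySem.Str.lower pattern) then
    "Comparatives"
  else if ["of", "have"].any (fun k => PySem.Str.isIn k (PySem.Str.lower pattern)) then
    "Modal Verbs"
  else
    "Grammar"

-- ===== PORT B =====
def pvLabels : List String :=
  ["Subject-Verb Agreement", "Article Usage", "Word Confusion",
   "Contractions", "Comparatives", "Modal Verbs", "Grammar"]

-- the _PRIORITY dict of Source B, in insertion order ('have' keeps its smaller index 0)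
def pvPriority : List (String × Nat) :=
  [("are", 0), ("is", 0), ("have", 0), ("has", 0),
   ("\\ba\\s", 1), ("\\ban\\s", 1),
   ("your", 2), ("its", 2), ("there", 2), ("to", 2),
   ("dont", 3), ("cant", 3), ("wont", 3),
   ("than", 4), ("better", 4),
   ("of", 5)]

def get_error_type_alt (pattern : String) : String :=
  let low := PySem.Str.lower pattern
  -- min((p for kw, p in _PRIORITY.items() if kw in low), default=6)
  let best := PySem.List.minD
      (pvPriority.filterMap (fun kw => if PySem.Str.isIn kw.1 low then some kw.2 else none))
      (fun p => p) 6
  -- _LABELS[best]: exact, since best ≤ 6 < 7 = pvLabels.length this never raises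
  pvLabels.getD best "Grammar"

-- ===== PRECONDITION & SPEC =====
def Spec_get_error_type (pattern : String) (out : String) : Prop := out = get_error_type_alt pattern
instance (pattern : String) (out : String) : Decidable (Spec_get_error_type pattern out) := by unfold Spec_get_error_type; infer_instance

-- ===== CLAIM (what is proved, stated in full; the proofs are below) =====
def Claim_equal_get_error_type : Prop := ∀ (pattern : String), Dom_get_error_type pattern → Spec_get_error_type pattern (get_error_type pattern)

-- ===== LEMMAS AND PROOFS =====

-- the min of a list of naturals containing p whose members are all ≥ p is p (with any default)
lemma pvMinD_eq {xs : List Nat} {p : Nat} (h1 : p ∈ xs) (h2 : ∀ q ∈ xs, p ≤ q) :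
    PySem.List.minD xs (fun x => x) 6 = p := by
  cases hm : PySem.List.min? xs (fun x => x) with
  | none =>
    rw [PySem.List.min?_eq_none_iff] at hm
    subst hm; simp at h1
  | some m =>
    have hmem := PySem.List.min?_mem hm
    have hle := PySem.List.min?_isMin hm p h1
    have hge := h2 m hmem
    simp [PySem.List.minD, hm]
    omega

-- every matched priority is ≥ p when all keywords of smaller priority are absent
lemma pvGe (pattern : String) (p : Nat)
    (hfalse : ∀ e ∈ pvPriority, e.2 < p → PySem.Str.isIn e.1 (PySem.Str.lower pattern) = false) :
    ∀ q ∈ pvPriority.filterMap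
        (fun kw => if PySem.Str.isIn kw.1 (PySem.Str.lower pattern) then some kw.2 else none),
      p ≤ q := by
  intro q hq
  obtain ⟨a, ha, hfa⟩ := List.mem_filterMap.mp hq
  split_ifs at hfa with hc
  · have haq : a.2 = q := by simpa using hfa
    by_contra hlt
    have hf := hfalse a ha (by omega)
    simp only [PySem.Str.isIn_eq, PySem.Str.toList_lower] at hf
    simp [hf] at hc

-- B returns pvLabels[p] when priority p is matched and nothing smaller is
lemma pvAlt_eq (pattern : String) (p : Nat)
    (hmem : p ∈ pvPriority.filterMap
        (fun kw => if PySem.Str.isIn kw.1 (PySem.Str.lower pattern) then some kw.2 else none))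
    (hfalse : ∀ e ∈ pvPriority, e.2 < p → PySem.Str.isIn e.1 (PySem.Str.lower pattern) = false) :
    get_error_type_alt pattern = pvLabels.getD p "Grammar" := by
  simp only [get_error_type_alt]
  rw [pvMinD_eq hmem (pvGe pattern p hfalse)]

-- ===== VERDICT (by name: the statement is the Claim_ definition above) =====
theorem get_error_type_spec : Claim_equal_get_error_type := by
  intro pattern _
  unfold Spec_get_error_type
  by_cases h0 : PySem.Chars.isIn ['a', 'r', 'e'] (PySem.Chars.lower pattern.toList) = true
  · rw [pvAlt_eq pattern 0 (List.mem_filterMap.mpr ⟨("are", 0), by simp [pvPriority], by simp [h0]⟩) (fun e he hlt => absurd hlt (by omega))]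
    simp [get_error_type, pvLabels, h0]
  by_cases h1 : PySem.Chars.isIn ['i', 's'] (PySem.Chars.lower pattern.toList) = true
  · rw [pvAlt_eq pattern 0 (List.mem_filterMap.mpr ⟨("is", 0), by simp [pvPriority], by simp [h1]⟩) (fun e he hlt => absurd hlt (by omega))]
    simp [get_error_type, pvLabels, h0, h1]
  by_cases h2 : PySem.Chars.isIn ['h', 'a', 'v', 'e'] (PySem.Chars.lower pattern.toList) = true
  · rw [pvAlt_eq pattern 0 (List.mem_filterMap.mpr ⟨("have", 0), by simp [pvPriority], by simp [h2]⟩) (fun e he hlt => absurd hlt (by omega))]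
    simp [get_error_type, pvLabels, h0, h1, h2]
  by_cases h3 : PySem.Chars.isIn ['h', 'a', 's'] (PySem.Chars.lower pattern.toList) = true
  · rw [pvAlt_eq pattern 0 (List.mem_filterMap.mpr ⟨("has", 0), by simp [pvPriority], by simp [h3]⟩) (fun e he hlt => absurd hlt (by omega))]
    simp [get_error_type, pvLabels, h0, h1, h2, h3]
  by_cases h4 : PySem.Chars.isIn ['\\', 'b', 'a', '\\', 's'] (PySem.Chars.lower pattern.toList) = true
  · rw [pvAlt_eq pattern 1 (List.mem_filterMap.mpr ⟨("\\ba\\s", 1), by simp [pvPriority], by simp [h4]⟩) (by intro e he hlt; unfold pvPriority at he; fin_cases he <;> simp_all)]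
    simp [get_error_type, pvLabels, h0, h1, h2, h3, h4]
  by_cases h5 : PySem.Chars.isIn ['\\', 'b', 'a', 'n', '\\', 's'] (PySem.Chars.lower pattern.toList) = true
  · rw [pvAlt_eq pattern 1 (List.mem_filterMap.mpr ⟨("\\ban\\s", 1), by simp [pvPriority], by simp [h5]⟩) (by intro e he hlt; unfold pvPriority at he; fin_cases he <;> simp_all)]
    simp [get_error_type, pvLabels, h0, h1, h2, h3, h4, h5]
  by_cases h6 : PySem.Chars.isIn ['y', 'o', 'u', 'r'] (PySem.Chars.lower pattern.toList) = true
  · rw [pvAlt_eq pattern 2 (List.mem_filterMap.mpr ⟨("your", 2), by simp [pvPriority], by simp [h6]⟩) (by intro e he hlt; unfold pvPriority at he; fin_cases he <;> simp_all)]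
    simp [get_error_type, pvLabels, h0, h1, h2, h3, h4, h5, h6]
  by_cases h7 : PySem.Chars.isIn ['i', 't', 's'] (PySem.Chars.lower pattern.toList) = true
  · rw [pvAlt_eq pattern 2 (List.mem_filterMap.mpr ⟨("its", 2), by simp [pvPriority], by simp [h7]⟩) (by intro e he hlt; unfold pvPriority at he; fin_cases he <;> simp_all)]
    simp [get_error_type, pvLabels, h0, h1, h2, h3, h4, h5, h6, h7]
  by_cases h8 : PySem.Chars.isIn ['t', 'h', 'e', 'r', 'e'] (PySem.Chars.lower pattern.toList) = true
  · rw [pvAlt_eq pattern 2 (List.mem_filterMap.mpr ⟨("there", 2), by simp [pvPriority], by simp [h8]⟩) (by intro e he hlt; unfold pvPriority at he; fin_cases he <;> simp_all)]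
    simp [get_error_type, pvLabels, h0, h1, h2, h3, h4, h5, h6, h7, h8]
  by_cases h9 : PySem.Chars.isIn ['t', 'o'] (PySem.Chars.lower pattern.toList) = true
  · rw [pvAlt_eq pattern 2 (List.mem_filterMap.mpr ⟨("to", 2), by simp [pvPriority], by simp [h9]⟩) (by intro e he hlt; unfold pvPriority at he; fin_cases he <;> simp_all)]
    simp [get_error_type, pvLabels, h0, h1, h2, h3, h4, h5, h6, h7, h8, h9]
  by_cases h10 : PySem.Chars.isIn ['d', 'o', 'n', 't'] (PySem.Chars.lower pattern.toList) = true
  · rw [pvAlt_eq pattern 3 (List.mem_filterMap.mpr ⟨("dont", 3), by simp [pvPriority], by simp [h10]⟩) (by intro e he hlt; unfold pvPriority at he; fin_cases he <;> simp_all)]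
    simp [get_error_type, pvLabels, h0, h1, h2, h3, h4, h5, h6, h7, h8, h9, h10]
  by_cases h11 : PySem.Chars.isIn ['c', 'a', 'n', 't'] (PySem.Chars.lower pattern.toList) = true
  · rw [pvAlt_eq pattern 3 (List.mem_filterMap.mpr ⟨("cant", 3), by simp [pvPriority], by simp [h11]⟩) (by intro e he hlt; unfold pvPriority at he; fin_cases he <;> simp_all)]
    simp [get_error_type, pvLabels, h0, h1, h2, h3, h4, h5, h6, h7, h8, h9, h10, h11]
  by_cases h12 : PySem.Chars.isIn ['w', 'o', 'n', 't'] (PySem.Chars.lower pattern.toList) = true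
  · rw [pvAlt_eq pattern 3 (List.mem_filterMap.mpr ⟨("wont", 3), by simp [pvPriority], by simp [h12]⟩) (by intro e he hlt; unfold pvPriority at he; fin_cases he <;> simp_all)]
    simp [get_error_type, pvLabels, h0, h1, h2, h3, h4, h5, h6, h7, h8, h9, h10, h11, h12]
  by_cases h13 : PySem.Chars.isIn ['t', 'h', 'a', 'n'] (PySem.Chars.lower pattern.toList) = true
  · rw [pvAlt_eq pattern 4 (List.mem_filterMap.mpr ⟨("than", 4), by simp [pvPriority], by simp [h13]⟩) (by intro e he hlt; unfold pvPriority at he; fin_cases he <;> simp_all)]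
    simp [get_error_type, pvLabels, h0, h1, h2, h3, h4, h5, h6, h7, h8, h9, h10, h11, h12, h13]
  by_cases h14 : PySem.Chars.isIn ['b', 'e', 't', 't', 'e', 'r'] (PySem.Chars.lower pattern.toList) = true
  · rw [pvAlt_eq pattern 4 (List.mem_filterMap.mpr ⟨("better", 4), by simp [pvPriority], by simp [h14]⟩) (by intro e he hlt; unfold pvPriority at he; fin_cases he <;> simp_all)]
    simp [get_error_type, pvLabels, h0, h1, h2, h3, h4, h5, h6, h7, h8, h9, h10, h11, h12, h13, h14]
  by_cases h15 : PySem.Chars.isIn ['o', 'f'] (PySem.Chars.lower pattern.toList) = true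
  · rw [pvAlt_eq pattern 5 (List.mem_filterMap.mpr ⟨("of", 5), by simp [pvPriority], by simp [h15]⟩) (by intro e he hlt; unfold pvPriority at he; fin_cases he <;> simp_all)]
    simp [get_error_type, pvLabels, h0, h1, h2, h3, h4, h5, h6, h7, h8, h9, h10, h11, h12, h13, h14, h15]
  have hmat : pvPriority.filterMap
      (fun kw => if PySem.Str.isIn kw.1 (PySem.Str.lower pattern) then some kw.2 else none) = [] := by
    simp [pvPriority, h0, h1, h2, h3, h4, h5, h6, h7, h8, h9, h10, h11, h12, h13, h14, h15]
  simp only [get_error_type_alt]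
  rw [hmat]
  simp [get_error_type, pvLabels, PySem.List.minD, PySem.List.min?, h0, h1, h2, h3, h4, h5, h6, h7, h8, h9, h10, h11, h12, h13, h14, h15]
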